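-- pv_equiv track=rewrite | github.com/andrewlott99/Kinnaird22 | coveringsystemsgenerator.py | prepartition
-- ===== SOURCE A (Python) =====
-- def prepartition(S,k):
--   allparts = []
--   r = len(S)
--   if r == 1:
--     for i in range(0,k):
--       allparts = allparts + [[[S[0],i]]]
--   else:
--     tempS = S.copy()
--     del tempS[r-1]
--     for part in prepartition(tempS, k):
--         for i in range(0,k):
--           newpart = []
--           newpart = part + [[S[r-1], i]]
--           allparts = allparts + [newpart]
--   return allparts
-- ===== SOURCE B (Python) =====
-- def prepartition(S, k):
--     result = [[]]
--     for s in S: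
--         result = [part + [[s, i]] for part in result for i in range(k)]
--     return result
-- ===== Notes on version B (the rewrite author's own statement) =====
-- stated objective: simpler
-- what changed: Replaced the remove-last-element recursion (with quadratic 'allparts = allparts + [x]' accumulation) by an iterative left-to-right Cartesian-power build: seed [[]] and extend every partial assignment by each label for the next element.
import Mathlib
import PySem

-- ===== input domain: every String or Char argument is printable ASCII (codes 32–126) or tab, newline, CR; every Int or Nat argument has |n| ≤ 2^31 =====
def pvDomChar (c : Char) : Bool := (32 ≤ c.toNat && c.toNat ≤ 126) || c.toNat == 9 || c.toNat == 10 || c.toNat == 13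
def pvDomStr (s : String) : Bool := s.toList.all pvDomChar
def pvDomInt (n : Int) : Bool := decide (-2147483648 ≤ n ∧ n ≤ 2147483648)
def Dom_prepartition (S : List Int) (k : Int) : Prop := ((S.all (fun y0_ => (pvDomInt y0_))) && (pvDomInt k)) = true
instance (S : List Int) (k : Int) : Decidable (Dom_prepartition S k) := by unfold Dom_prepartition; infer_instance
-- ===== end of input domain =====

-- B replaces the remove-last recursion by an iterative Cartesian-power build (simpler); return-value equivalence only.
-- ===== PORT A =====
def prepartition (S : List Int) (k : Int) : List (List (List Int)) :=
  if h : S = [] then [] -- Python raises IndexError here ('del tempS[r-1]' on the empty copy); excluded by Pre_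
  else if S.length == 1 then
    (PySem.List.pyRange 0 k 1).foldl
      (fun allparts i => allparts ++ [[[(PySem.List.pyGet? S 0).getD 0, i]]]) []
  else
    (prepartition S.dropLast k).foldl
      (fun allparts part =>
        (PySem.List.pyRange 0 k 1).foldl
          (fun acc i => acc ++ [part ++ [[(PySem.List.pyGet? S ((S.length : Int) - 1)).getD 0, i]]]) allparts) []
termination_by S.length
decreasing_by
  have : 0 < S.length := List.length_pos_iff.mpr h
  simp [List.length_dropLast]; omega

-- ===== PORT B =====
def prepartition_alt (S : List Int) (k : Int) : List (List (List Int)) :=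
  S.foldl
    (fun result s =>
      result.flatMap (fun part => (PySem.List.pyRange 0 k 1).map (fun i => part ++ [[s, i]])))
    [[]]

-- ===== PRECONDITION & SPEC =====
-- Pre_ excludes only S = [], where Python A raises IndexError.
def Pre_prepartition (S : List Int) (k : Int) : Prop := S ≠ []
instance (S : List Int) (k : Int) : Decidable (Pre_prepartition S k) := by unfold Pre_prepartition; infer_instance
def pvWitness_prepartition : List Int × Int := ([1, 2], 2)

def Spec_prepartition (S : List Int) (k : Int) (out : List (List (List Int))) : Prop := out = prepartition_alt S k
instance (S : List Int) (k : Int) (out : List (List (List Int))) : Decidable (Spec_prepartition S k out) := by unfold Spec_prepartition; infer_instance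

-- ===== CLAIM (what is proved, stated in full; the proofs are below) =====
def Claim_equal_prepartition : Prop := ∀ (S : List Int) (k : Int), Dom_prepartition S k → Pre_prepartition S k → Spec_prepartition S k (prepartition S k)

-- ===== LEMMAS AND PROOFS =====

theorem flatten_map_singleton {α : Type} (f : Int → α) (R : List Int) :
    (R.map (fun i => [f i])).flatten = R.map f := by
  induction R with
  | nil => rfl
  | cons a t ih => simp [ih]

-- one step of B's loop
def altStep (k : Int) (result : List (List (List Int))) (s : Int) : List (List (List Int)) :=
  result.flatMap (fun part => (PySem.List.pyRange 0 k 1).map (fun i => part ++ [[s, i]]))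

theorem alt_eq_foldl_step (S : List Int) (k : Int) :
    prepartition_alt S k = S.foldl (altStep k) [[]] := rfl

theorem last_get (S : List Int) (x : Int) :
    (PySem.List.pyGet? (S ++ [x]) (((S ++ [x]).length : Int) - 1)).getD 0 = x := by
  simp [PySem.List.pyGet?, PySem.List.pyIdx?]

theorem A_snoc (S : List Int) (x : Int) (k : Int) (h : S ≠ []) :
    prepartition (S ++ [x]) k = altStep k (prepartition S k) x := by
  have hlen : (S ++ [x]).length ≠ 1 := by
    simpa using h
  rw [prepartition]
  simp only [List.append_eq_nil_iff, reduceCtorEq, and_false, dite_false,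
    List.dropLast_concat, beq_iff_eq, hlen, if_false, last_get]
  rw [show (fun (allparts : List (List (List Int))) (part : List (List Int)) =>
        (PySem.List.pyRange 0 k 1).foldl (fun acc i => acc ++ [part ++ [[x, i]]]) allparts)
      = (fun allparts part => allparts ++ (PySem.List.pyRange 0 k 1).map (fun i => part ++ [[x, i]]))
    from funext fun a => funext fun p => PySem.List.foldl_append_singleton_eq_map ..]
  rw [PySem.List.foldl_append_eq_flatMap]
  simp [altStep]

theorem A_single (x : Int) (k : Int) :
    prepartition [x] k = altStep k [[]] x := by
  rw [prepartition]
  simp [altStep, flatten_map_singleton (fun i => [[x, i]])]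

theorem main (S : List Int) (k : Int) (h : S ≠ []) :
    prepartition S k = prepartition_alt S k := by
  induction S using List.reverseRecOn with
  | nil => exact absurd rfl h
  | append_singleton T x ih =>
    rw [alt_eq_foldl_step, List.foldl_append]
    by_cases hT : T = []
    · subst hT; simpa using A_single x k
    · rw [A_snoc T x k hT, ih hT, alt_eq_foldl_step]
      rfl

-- ===== VERDICT (by name: the statement is the Claim_ definition above) =====
theorem prepartition_spec : Claim_equal_prepartition := by
  intro S k _ hpre
  unfold Spec_prepartition
  exact main S k hpre
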